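-- pv_equiv track=rewrite | github.com/glorious-purpose/coding_help | personal/leetcode/python/numbers_at_most_n.py | solve
-- ===== SOURCE A (Python) =====
-- def solve(digits: list[str], n: int) -> int:
--     count = 0
--     dc = len(str(n))
--     pos = len(digits)
--     for i in range(1, dc):
--         count += pos**i
--
--     for i, dig in enumerate(str(n)):
--         for char in digits:
--             if char < dig:
--                 count += pos ** (dc - i - 1)
--             else:
--                 break
--         if dig not in digits:
--             break
--     return count
-- ===== SOURCE B (Python) =====
-- from itertools import takewhile
--
--
-- def solve(digits: list[str], n: int) -> int:
--     s = str(n)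
--     p = len(digits)
--     d = len(s)
--     # all shorter lengths at once: closed-form geometric sum p + p**2 + ... + p**(d-1)
--     shorter = d - 1 if p == 1 else (p**d - p) // (p - 1)
--     # right-to-left scan: a character outside the digit set voids everything to its right
--     acc, power = 0, 1
--     for c in reversed(s):
--         lt = sum(1 for _ in takewhile(lambda x: x < c, digits))
--         acc = lt * power + (acc if c in digits else 0)
--         power *= p
--     return shorter + acc
-- ===== Notes on version B (the rewrite author's own statement) =====
-- stated objective: alternative
-- what changed: B drops A's forward per-position loops (power accumulation plus an inner break loop and an outer break): it computes the shorter-length count by a closed-form geometric sum ((p**d - p)//(p-1)) and does one right-to-left scan of str(n) that maintains the power multiplicatively and voids the accumulator when a character is outside the digit set, so no break and no per-position exponentiation remain.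
import Mathlib
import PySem

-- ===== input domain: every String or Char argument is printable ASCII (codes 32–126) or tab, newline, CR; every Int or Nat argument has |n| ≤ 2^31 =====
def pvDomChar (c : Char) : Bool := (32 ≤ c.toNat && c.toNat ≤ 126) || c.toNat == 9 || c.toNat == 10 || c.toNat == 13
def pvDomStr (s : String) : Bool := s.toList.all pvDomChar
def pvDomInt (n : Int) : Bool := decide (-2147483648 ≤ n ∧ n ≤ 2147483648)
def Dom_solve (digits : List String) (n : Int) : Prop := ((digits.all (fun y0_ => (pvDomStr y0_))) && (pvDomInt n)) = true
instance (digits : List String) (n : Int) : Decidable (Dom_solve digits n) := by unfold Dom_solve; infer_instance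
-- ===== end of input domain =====

-- B replaces A's two forward loops (per-position power sums with an inner break) by a
-- closed-form geometric sum for the shorter lengths plus ONE right-to-left scan of str(n)
-- that keeps a running power and voids the accumulator at a char outside the digit set;
-- objective: alternative (same cost, different algorithm shape).

-- ===== PORT A =====
-- inner 'for char in digits: if char < dig: count += add else: break'
def solveInner (digits : List String) (dig : String) (add : Int) (count : Int) : Int :=
  match digits with
  | [] => count
  | char :: rest => if char < dig then solveInner rest dig add (count + add) else count

-- outer 'for i, dig in enumerate(str(n)): … ; if dig not in digits: break'
-- exponent dc - i - 1 is nonnegative throughout (0 ≤ i < dc), so '.toNat' is exact here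
def solveOuter (digits : List String) (pos dc : Int) (count : Int) : List (Int × Char) → Int
  | [] => count
  | (i, c) :: rest =>
    let dig := String.ofList [c]
    let count' := solveInner digits dig (pos ^ ((dc - i - 1).toNat)) count
    if digits.contains dig then solveOuter digits pos dc count' rest else count'

def solve (digits : List String) (n : Int) : Int :=
  let s := PySem.Int.toChars n
  let dc : Int := (s.length : Int)
  let pos : Int := (digits.length : Int)
  -- 'for i in range(1, dc): count += pos**i' — i ≥ 1, so '.toNat' on the exponent is exact
  let count := (PySem.List.pyRange 1 dc 1).foldl (fun c i => c + pos ^ i.toNat) 0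
  solveOuter digits pos dc count (PySem.List.enumerate s)

-- ===== PORT B =====
def solve_alt (digits : List String) (n : Int) : Int :=
  let s := PySem.Int.toChars n
  let p : Int := (digits.length : Int)
  let d : Int := (s.length : Int)
  -- 'd - 1 if p == 1 else (p**d - p) // (p - 1)'  (p**d with d = len(s) ≥ 0, exact as p ^ s.length)
  let shorter : Int := if p = 1 then d - 1 else PySem.Int.floordiv (p ^ s.length - p) (p - 1)
  -- 'for c in reversed(s): lt = …takewhile…; acc = lt*power + (acc if c in digits else 0); power *= p'
  let st := s.reverse.foldl
    (fun (st : Int × Int) c =>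
      let lt : Int := ((digits.takeWhile (fun x => decide (x < String.ofList [c]))).length : Int)
      (lt * st.2 + (if digits.contains (String.ofList [c]) then st.1 else 0), st.2 * p))
    (0, 1)
  shorter + st.1

-- ===== PRECONDITION & SPEC =====
def Spec_solve (digits : List String) (n : Int) (out : Int) : Prop := out = solve_alt digits n
instance (digits : List String) (n : Int) (out : Int) : Decidable (Spec_solve digits n out) := by unfold Spec_solve; infer_instance

-- ===== CLAIM (what is proved, stated in full; the proofs are below) =====
def Claim_equal_solve : Prop := ∀ (digits : List String) (n : Int), Dom_solve digits n → Spec_solve digits n (solve digits n)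

-- ===== LEMMAS AND PROOFS =====

-- str(n) is never the empty string
theorem toDigitsCore_length (b : Nat) : ∀ (fuel n : Nat) (ds : List Char),
    ds.length + 1 ≤ (Nat.toDigitsCore b (fuel + 1) n ds).length := by
  intro fuel
  induction fuel with
  | zero =>
    intro n ds
    simp only [Nat.toDigitsCore]
    split <;> simp
  | succ f ih =>
    intro n ds
    simp only [Nat.toDigitsCore]
    split
    · simp
    · calc ds.length + 1 ≤ (Nat.digitChar (n % b) :: ds).length := by simp
        _ ≤ _ := Nat.le_of_succ_le (ih _ _)

theorem toChars_ne_nil (n : Int) : PySem.Int.toChars n ≠ [] := by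
  unfold PySem.Int.toChars
  split
  · simp
  · intro h
    have := toDigitsCore_length 10 n.toNat n.toNat []
    rw [Nat.toDigits] at h
    rw [h] at this
    simp at this

-- prefix count of digits below dig
def plv (digits : List String) (dig : String) : Int :=
  ((digits.takeWhile (fun d => decide (d < dig))).length : Int)

-- reference value of the positional scan over a suffix t of str(n), head exponent = |t| - 1
def refSum (digits : List String) (pos : Int) : List Char → Int
  | [] => 0
  | c :: rest =>
    plv digits (String.ofList [c]) * pos ^ rest.length +
      (if digits.contains (String.ofList [c]) then refSum digits pos rest else 0)

theorem inner_eq (digits : List String) (dig : String) (add : Int) :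
    ∀ count, solveInner digits dig add count = count + plv digits dig * add := by
  induction digits with
  | nil => intro count; simp [solveInner, plv]
  | cons char rest ih =>
    intro count
    by_cases h : char < dig
    · simp only [solveInner, if_pos h, ih, plv, List.takeWhile_cons, decide_eq_true h,
        if_true, List.length_cons]
      push_cast
      ring
    · have hd : (decide (char < dig)) = false := decide_eq_false h
      simp only [solveInner, if_neg h, plv, List.takeWhile_cons, hd, Bool.false_eq_true,
        if_false, List.length_nil]
      push_cast
      ring

theorem outer_eq (digits : List String) (pos dc : Int) :
    ∀ (t : List Char) (i count : Int), dc = i + t.length →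
      solveOuter digits pos dc count (PySem.List.enumerate t i)
        = count + refSum digits pos t := by
  intro t
  induction t with
  | nil => intro i count _; simp [PySem.List.enumerate_nil, solveOuter, refSum]
  | cons c rest ih =>
    intro i count h
    have hexp : (dc - i - 1).toNat = rest.length := by
      push_cast [List.length_cons] at h; omega
    rw [PySem.List.enumerate_cons]
    simp only [solveOuter, hexp, inner_eq]
    by_cases hm : digits.contains (String.ofList [c])
    · rw [if_pos hm, ih (i + 1) _ (by push_cast [List.length_cons] at h ⊢; omega)]
      simp only [refSum, if_pos hm]
      ring
    · rw [if_neg hm]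
      simp only [refSum, if_neg hm]
      ring

-- pos + pos^2 + ... + pos^j
def sumPow (pos : Int) : Nat → Int
  | 0 => 0
  | j + 1 => sumPow pos j + pos ^ (j + 1)

-- A's range(1, dc) loop computes sumPow (dc - 1)
theorem geomA (pos : Int) : ∀ (m : Nat) (z : Int),
    (PySem.List.pyRange 1 (m : Int) 1).foldl (fun c i => c + pos ^ i.toNat) z
      = z + sumPow pos (m - 1) := by
  intro m
  induction m with
  | zero =>
    intro z
    rw [PySem.List.pyRange_one_eq_nil (by norm_num)]
    simp [sumPow]
  | succ m ih =>
    intro z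
    match m, ih with
    | 0, _ =>
      rw [show ((1 : Nat) : Int) = 1 by norm_num, PySem.List.pyRange_one_eq_nil le_rfl]
      simp [sumPow]
    | m + 1, ih =>
      rw [show ((m + 1 + 1 : Nat) : Int) = ((m + 1 : Nat) : Int) + 1 by push_cast; ring,
        PySem.List.pyRange_one_succ_right (by exact_mod_cast Nat.one_le_iff_ne_zero.mpr (by simp)),
        List.foldl_append, ih]
      simp only [List.foldl_cons, List.foldl_nil, Int.toNat_natCast]
      show z + sumPow pos m + pos ^ (m + 1) = z + sumPow pos (m + 1)
      simp [sumPow]; ring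

-- geometric identity behind B's closed form
theorem sumPow_mul (p : Int) : ∀ m : Nat, (p - 1) * sumPow p m = p ^ (m + 1) - p := by
  intro m
  induction m with
  | zero => simp [sumPow]
  | succ j ih =>
    show (p - 1) * (sumPow p j + p ^ (j + 1)) = p ^ (j + 1 + 1) - p
    rw [mul_add, ih]
    ring

theorem sumPow_one : ∀ m : Nat, sumPow 1 m = m := by
  intro m
  induction m with
  | zero => simp [sumPow]
  | succ j ih => show sumPow 1 j + 1 ^ (j + 1) = (j + 1 : Nat); push_cast [sumPow, ih]; ring

-- B's closed-form branch equals sumPow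
theorem shorter_eq (p : Int) (m : Nat) :
    (if p = 1 then ((m + 1 : Nat) : Int) - 1 else PySem.Int.floordiv (p ^ (m + 1) - p) (p - 1))
      = sumPow p m := by
  by_cases hp : p = 1
  · subst hp; rw [if_pos rfl, sumPow_one]; push_cast; ring
  · rw [if_neg hp, ← sumPow_mul]
    have hb : p - 1 ≠ 0 := fun h => hp (by omega)
    have hdvd : PySem.Int.mod ((p - 1) * sumPow p m) (p - 1) = 0 :=
      (PySem.Int.mod_eq_zero_iff_dvd _ _).mpr ⟨sumPow p m, rfl⟩
    have := PySem.Int.floordiv_mul_add_mod ((p - 1) * sumPow p m) (p - 1)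
    rw [hdvd, add_zero] at this
    exact mul_right_cancel₀ hb (by rw [this]; ring)

-- B's reversed scan computes refSum together with the running power
theorem revFold_eq (digits : List String) (p : Int) : ∀ (t : List Char),
    t.reverse.foldl
      (fun (st : Int × Int) c =>
        let lt : Int := ((digits.takeWhile (fun x => decide (x < String.ofList [c]))).length : Int)
        (lt * st.2 + (if digits.contains (String.ofList [c]) then st.1 else 0), st.2 * p))
      (0, 1)
      = (refSum digits p t, p ^ t.length) := by
  intro t
  induction t with
  | nil => simp [refSum]
  | cons c rest ih =>
    rw [List.reverse_cons, List.foldl_append, ih]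
    simp only [List.foldl_cons, List.foldl_nil, refSum, List.length_cons, plv]
    exact Prod.ext rfl (by ring)

-- ===== VERDICT (by name: the statement is the Claim_ definition above) =====
theorem solve_spec : Claim_equal_solve := by
  intro digits n _
  show solve digits n = solve_alt digits n
  obtain ⟨m, hm⟩ : ∃ m : Nat, (PySem.Int.toChars n).length = m + 1 := by
    cases h : (PySem.Int.toChars n).length with
    | zero => exact absurd (List.length_eq_zero_iff.mp h) (toChars_ne_nil n)
    | succ m => exact ⟨m, rfl⟩
  dsimp only [solve, solve_alt]
  rw [revFold_eq, outer_eq digits _ _ (PySem.Int.toChars n) 0 _ (by ring), hm]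
  rw [show ((m + 1 : Nat) : Int) = ((m + 1 : Nat) : Int) from rfl, geomA]
  have := shorter_eq (digits.length : Int) m
  simp only [Nat.add_sub_cancel]
  rw [this]
  ring
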